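-- pv_equiv track=rewrite | github.com/HarjjotSinghh/TopperHQ | web_scraper_learncbse_hindi.py | filter_similar_strings
-- ===== SOURCE A (Python) =====
-- def filter_similar_strings(data):
--     result = []
--     seen = set()
--
--     for item in data:
--         key = item.split(" ")[0]  # Extract the key (e.g., "question")
--         if key in seen:
--             continue  # Skip if we've already processed a similar key
--         similar_items = [x for x in data if x.startswith(key)]
--         if len(similar_items) > 1:  # Check if there are similar strings
--             longest_item = max(similar_items, key=len)  # Find the longest string
--             result.append(longest_item)
--         else:
--             result.append(item)  # Keep the string as it is if no similar strings found
--         seen.add(key)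
--
--     return result
-- ===== SOURCE B (Python) =====
-- def filter_similar_strings(data):
--     # Build a prefix index once: every prefix of every string maps to
--     # (number of strings having that prefix, first longest such string).
--     info = {}
--     for s in data:
--         for i in range(len(s) + 1):
--             p = s[:i]
--             e = info.get(p)
--             if e is None:
--                 info[p] = (1, s)
--             else:
--                 c, b = e
--                 info[p] = (c + 1, s if len(b) < len(s) else b)
--
--     result = []
--     seen = set()
--     for item in data:
--         key = item.split(" ")[0]
--         if key in seen:
--             continue
--         e = info.get(key)
--         if e is not None and e[0] > 1:
--             result.append(e[1])
--         else:
--             result.append(item)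
--         seen.add(key)
--     return result
-- ===== Notes on version B (the rewrite author's own statement) =====
-- stated objective: faster
-- what changed: Replaces the per-key rescans of the whole list (list comprehension + max for every new key) by a prefix index built in one pass: a dict mapping every prefix of every string to (count of strings with that prefix, first longest such string), so each key is answered by a single dict lookup.
import Mathlib
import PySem

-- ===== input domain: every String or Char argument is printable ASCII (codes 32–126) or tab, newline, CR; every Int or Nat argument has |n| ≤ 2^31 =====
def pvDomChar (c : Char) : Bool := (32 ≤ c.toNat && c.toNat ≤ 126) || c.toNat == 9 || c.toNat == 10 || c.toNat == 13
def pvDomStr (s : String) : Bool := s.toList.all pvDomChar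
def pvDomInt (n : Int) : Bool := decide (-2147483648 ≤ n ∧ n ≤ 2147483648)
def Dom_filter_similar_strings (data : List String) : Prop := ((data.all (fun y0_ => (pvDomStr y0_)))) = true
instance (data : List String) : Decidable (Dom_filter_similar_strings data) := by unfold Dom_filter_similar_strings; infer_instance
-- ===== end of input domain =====

-- B replaces A's per-key rescans of the whole list by a prefix index (dict from every
-- prefix to (count, first longest match)) built once, queried per key: faster.


-- ===== PORT A =====
-- key = item.split(" ")[0]  (split(" ") is never empty, so [0] never raises)
def pvKey (item : String) : String :=
  ((PySem.Str.split? item " ").getD []).headD ""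

def filter_similar_strings (data : List String) : List String :=
  (data.foldl (fun (st : List String × PySem.Set String) item =>
      let key := pvKey item
      if PySem.Set.contains st.2 key then st
      else
        let similar := data.filter (fun x => PySem.Str.startswith x key)
        if similar.length > 1 then
          -- max(similar_items, key=len); the none branch is unreachable (length > 1)
          (match PySem.List.max? similar (fun x => PySem.Str.len x) with
           | some m => (st.1 ++ [m], PySem.Set.add st.2 key)
           | none => (st.1 ++ [item], PySem.Set.add st.2 key))
        else
          (st.1 ++ [item], PySem.Set.add st.2 key))
    ([], PySem.Set.empty)).1

-- ===== PORT B =====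
-- info[p] = e is None ? (1, s) : (c+1, s if len(b) < len(s) else b)
def pvUpd (d : PySem.Dict (List Char) (Int × String)) (p : List Char) (s : String) :
    PySem.Dict (List Char) (Int × String) :=
  match d.get? p with
  | none => d.insert p (1, s)
  | some e => d.insert p (e.1 + 1, if PySem.Str.len e.2 < PySem.Str.len s then s else e.2)

-- [s[:i] for i in range(len(s)+1)]  (string keys represented as List Char)
def pvPrefixes (cs : List Char) : List (List Char) :=
  (List.range (cs.length + 1)).map (cs.take ·)

-- for p in prefixes(s): _upd(info, p, s)
def pvAddPrefixes (d : PySem.Dict (List Char) (Int × String)) (s : String) :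
    PySem.Dict (List Char) (Int × String) :=
  (pvPrefixes s.toList).foldl (fun d q => pvUpd d q s) d

def pvBuildInfo (data : List String) : PySem.Dict (List Char) (Int × String) :=
  data.foldl pvAddPrefixes PySem.Dict.empty

def filter_similar_strings_alt (data : List String) : List String :=
  let info := pvBuildInfo data
  (data.foldl (fun (st : List String × PySem.Set String) item =>
      let key := pvKey item
      if PySem.Set.contains st.2 key then st
      else
        match info.get? key.toList with
        | some e =>
          if e.1 > 1 then (st.1 ++ [e.2], PySem.Set.add st.2 key)
          else (st.1 ++ [item], PySem.Set.add st.2 key)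
        | none => (st.1 ++ [item], PySem.Set.add st.2 key))
    ([], PySem.Set.empty)).1

-- ===== PRECONDITION & SPEC =====
def Spec_filter_similar_strings (data : List String) (out : List String) : Prop := out = filter_similar_strings_alt data
instance (data : List String) (out : List String) : Decidable (Spec_filter_similar_strings data out) := by unfold Spec_filter_similar_strings; infer_instance

-- ===== CLAIM (what is proved, stated in full; the proofs are below) =====
def Claim_equal_filter_similar_strings : Prop := ∀ (data : List String), Dom_filter_similar_strings data → Spec_filter_similar_strings data (filter_similar_strings data)

-- ===== LEMMAS AND PROOFS =====

-- the value pvUpd stores for key p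
def pvStepE (o : Option (Int × String)) (s : String) : Int × String :=
  match o with
  | none => (1, s)
  | some e => (e.1 + 1, if PySem.Str.len e.2 < PySem.Str.len s then s else e.2)

theorem pvUpd_get? (d : PySem.Dict (List Char) (Int × String)) (q : List Char) (s : String)
    (p : List Char) :
    (pvUpd d q s).get? p = if p = q then some (pvStepE (d.get? q) s) else d.get? p := by
  unfold pvUpd pvStepE
  by_cases hpq : p = q
  · subst hpq
    rcases h : d.get? p with _ | e <;> simp [PySem.Dict.get?_insert_self]
  · rcases h : d.get? q with _ | e <;>
      simp [hpq, PySem.Dict.get?_insert_of_ne _ _ hpq]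

theorem foldl_pvUpd_get? (s : String) (Ps : List (List Char)) (hnd : Ps.Nodup)
    (d : PySem.Dict (List Char) (Int × String)) (p : List Char) :
    ((Ps.foldl (fun d q => pvUpd d q s) d).get? p) =
      if p ∈ Ps then some (pvStepE (d.get? p) s) else d.get? p := by
  induction Ps generalizing d with
  | nil => simp
  | cons q Qs ih =>
    rcases List.nodup_cons.mp hnd with ⟨hq, hQs⟩
    simp only [List.foldl_cons, ih hQs, List.mem_cons, pvUpd_get?]
    by_cases hmem : p ∈ Qs
    · have hne : p ≠ q := fun h => hq (h ▸ hmem)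
      simp [hmem, hne]
    · by_cases hpq : p = q <;> simp [hmem, hpq, hq]

theorem mem_pvPrefixes (cs p : List Char) : p ∈ pvPrefixes cs ↔ p <+: cs := by
  unfold pvPrefixes
  constructor
  · rintro h
    rcases List.mem_map.mp h with ⟨i, _, rfl⟩
    exact List.take_prefix i cs
  · intro h
    refine List.mem_map.mpr ⟨p.length, ?_, (List.prefix_iff_eq_take.mp h).symm⟩
    exact List.mem_range.mpr (Nat.lt_succ_of_le h.length_le)

theorem nodup_pvPrefixes (cs : List Char) : (pvPrefixes cs).Nodup := by
  unfold pvPrefixes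
  refine List.Nodup.map_on ?_ (List.nodup_range)
  intro i hi j hj hij
  have hi' : i ≤ cs.length := Nat.lt_succ_iff.mp (List.mem_range.mp hi)
  have hj' : j ≤ cs.length := Nat.lt_succ_iff.mp (List.mem_range.mp hj)
  have := congrArg List.length hij
  simpa [List.length_take, Nat.min_eq_left hi', Nat.min_eq_left hj'] using this

theorem pvAddPrefixes_get? (d : PySem.Dict (List Char) (Int × String)) (s : String)
    (p : List Char) :
    (pvAddPrefixes d s).get? p =
      if p <+: s.toList then some (pvStepE (d.get? p) s) else d.get? p := by
  unfold pvAddPrefixes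
  rw [foldl_pvUpd_get? s _ (nodup_pvPrefixes s.toList) d p]
  simp [mem_pvPrefixes]

-- the entry for p after processing `data` is a fold of pvStepE over the strings with prefix p
theorem pvBuildInfo_fold_get? (data : List String) (d : PySem.Dict (List Char) (Int × String))
    (p : List Char) :
    ((data.foldl pvAddPrefixes d).get? p) =
      data.foldl (fun o s => if p <+: s.toList then some (pvStepE o s) else o) (d.get? p) := by
  induction data generalizing d with
  | nil => rfl
  | cons s rest ih =>
    simp only [List.foldl_cons, ih, pvAddPrefixes_get?]

theorem max?_cons (t : List String) (m : String) :
    PySem.List.max? (m :: t) (fun s => PySem.Str.len s) =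
      some (t.foldl (fun b x => if PySem.Str.len b < PySem.Str.len x then x else b) m) := by
  induction t generalizing m with
  | nil => rfl
  | cons x t ih =>
    have h2 : PySem.List.max? (m :: x :: t) (fun s => PySem.Str.len s)
        = PySem.List.max? ((if PySem.Str.len m < PySem.Str.len x then x else m) :: t)
            (fun s => PySem.Str.len s) := by
      simp only [PySem.List.max?, List.foldl_cons]
      by_cases h : PySem.Str.len m < PySem.Str.len x
      · simp only [if_pos h]
      · simp only [if_neg h]
    rw [h2, ih]
    simp only [List.foldl_cons]

theorem pvStepE_count_max (l : List String) (c : Int) (m : String) :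
    l.foldl (fun o s => some (pvStepE o s)) (some (c, m)) =
      some (c + l.length,
        l.foldl (fun b x => if PySem.Str.len b < PySem.Str.len x then x else b) m) := by
  induction l generalizing c m with
  | nil => simp
  | cons x t ih =>
    simp only [List.foldl_cons]
    rw [show some (pvStepE (some (c, m)) x) =
        some (c + 1, if PySem.Str.len m < PySem.Str.len x then x else m) from rfl, ih]
    refine congrArg some (Prod.ext ?_ rfl)
    simp only [List.length_cons]
    push_cast; ring

theorem fold_entry_eq (l : List String) :
    l.foldl (fun o s => some (pvStepE o s)) none =
      (PySem.List.max? l (fun x => PySem.Str.len x)).map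
        (fun m => ((l.length : Int), m)) := by
  cases l with
  | nil => rfl
  | cons x t =>
    rw [max?_cons]
    simp only [List.foldl_cons]
    rw [show (some (pvStepE none x)) = some ((1 : Int), x) from rfl, pvStepE_count_max]
    simp only [Option.map_some, List.length_cons]
    refine congrArg some (Prod.ext ?_ rfl)
    push_cast; ring

theorem startswith_eq_decide_prefix (x key : String) :
    PySem.Str.startswith x key = decide (key.toList <+: x.toList) := by
  rcases h : PySem.Chars.startswith x.toList key.toList with _ | _
  · simp only [PySem.Str.startswith_eq, h]
    symm; simp only [decide_eq_false_iff_not]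
    intro hpre
    exact absurd ((PySem.Chars.startswith_iff _ _).mpr hpre) (by simp [h])
  · simp only [PySem.Str.startswith_eq, h]
    symm; simp [((PySem.Chars.startswith_iff _ _).mp h)]

theorem pvBuildInfo_get?_key (data : List String) (key : String) :
    (pvBuildInfo data).get? key.toList =
      (PySem.List.max? (data.filter (fun x => PySem.Str.startswith x key))
          (fun x => PySem.Str.len x)).map
        (fun m => (((data.filter (fun x => PySem.Str.startswith x key)).length : Int), m)) := by
  unfold pvBuildInfo
  rw [pvBuildInfo_fold_get?, ← fold_entry_eq, List.foldl_filter]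
  have hinit : (PySem.Dict.empty.get? key.toList : Option (Int × String)) = none := rfl
  rw [hinit]
  have hf : (fun (o : Option (Int × String)) s =>
        if key.toList <+: s.toList then some (pvStepE o s) else o) =
      (fun (o : Option (Int × String)) s =>
        if PySem.Str.startswith s key = true then some (pvStepE o s) else o) := by
    funext o s
    rw [startswith_eq_decide_prefix s key]
    by_cases h : key.toList <+: s.toList
    · rw [if_pos h, if_pos (by simp [h])]
    · rw [if_neg h, if_neg (by simp [h])]
  rw [hf]

-- ===== VERDICT (by name: the statement is the Claim_ definition above) =====
theorem filter_similar_strings_spec : Claim_equal_filter_similar_strings := by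
  intro data _
  unfold Spec_filter_similar_strings filter_similar_strings filter_similar_strings_alt
  congr 2
  funext st item
  simp only []
  by_cases hseen : PySem.Set.contains st.2 (pvKey item) = true
  · rw [if_pos hseen, if_pos hseen]
  · rw [if_neg hseen, if_neg hseen, pvBuildInfo_get?_key data (pvKey item)]
    rcases hmax : PySem.List.max? (data.filter (fun x => PySem.Str.startswith x (pvKey item)))
        (fun x => PySem.Str.len x) with _ | m
    · have hnil : data.filter (fun x => PySem.Str.startswith x (pvKey item)) = [] :=
        (PySem.List.max?_eq_none_iff _ _).mp hmax
      have hlen : ¬ (data.filter (fun x => PySem.Str.startswith x (pvKey item))).length > 1 := by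
        rw [hnil]; simp
      rw [if_neg hlen]
      simp only [Option.map_none]
    · by_cases hlen : (data.filter (fun x => PySem.Str.startswith x (pvKey item))).length > 1
      · have hc : ((1:Int) < ((data.filter (fun x => PySem.Str.startswith x (pvKey item))).length : Int)) := by
          exact_mod_cast hlen
        rw [if_pos hlen]
        simp only [Option.map_some, if_pos hc]
      · have hc : ¬ ((1:Int) < ((data.filter (fun x => PySem.Str.startswith x (pvKey item))).length : Int)) := by
          exact_mod_cast hlen
        rw [if_neg hlen]
        simp only [Option.map_some, if_neg hc]
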